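-- pv_equiv track=rewrite | github.com/RohanAnandPandit/Haskell-Evaluator | src/String_Formatting.py | checkOperators
-- ===== SOURCE A (Python) =====
-- def checkOperators(exp):
--     operators = ['|','+', '*', '@', '&', '|', '-', ':', '<', '>', '=','/', '^','(',')']
--     for char in exp:
--         if (char in operators):
--             return True
--         else:
--             continue
--     return False
-- ===== SOURCE B (Python) =====
-- _DELETE_OPS = str.maketrans('', '', "|+*@&-:<>=/^()")
--
-- def checkOperators(exp):
--     # Delete every operator character; operators were present iff the string shrank.
--     return len(exp.translate(_DELETE_OPS)) != len(exp)
-- ===== Notes on version B (the rewrite author's own statement) =====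
-- stated objective: faster
-- what changed: Instead of a Python-level char-by-char loop with early-exit membership tests, B deletes all operator characters with str.translate (a single C-level filtering pass) and reports presence by comparing the resulting length to the original.
import Mathlib
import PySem

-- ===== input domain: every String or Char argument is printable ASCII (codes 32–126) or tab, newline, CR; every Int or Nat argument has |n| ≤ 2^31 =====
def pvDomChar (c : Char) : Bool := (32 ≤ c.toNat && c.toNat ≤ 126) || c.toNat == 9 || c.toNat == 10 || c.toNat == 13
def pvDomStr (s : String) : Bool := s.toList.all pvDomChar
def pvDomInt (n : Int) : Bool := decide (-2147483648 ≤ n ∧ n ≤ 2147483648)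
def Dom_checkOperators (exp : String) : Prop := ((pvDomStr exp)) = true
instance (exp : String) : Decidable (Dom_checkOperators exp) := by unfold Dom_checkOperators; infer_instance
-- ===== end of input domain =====

-- B deletes all operator characters (str.translate) and detects presence by a length change, instead of A's early-exit scan.
-- ===== PORT A =====
-- operators = ['|','+', '*', '@', '&', '|', '-', ':', '<', '>', '=','/', '^','(',')']
def coOperators : List Char := ['|','+','*','@','&','|','-',':','<','>','=','/','^','(',')']

-- the for-loop with early 'return True' / final 'return False'
def coLoop : List Char → Bool
  | [] => false
  | c :: rest => if coOperators.contains c then true else coLoop rest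

def checkOperators (exp : String) : Bool := coLoop exp.toList

-- ===== PORT B =====
-- _DELETE_OPS deletes the characters of "|+*@&-:<>=/^()"; translate = filter keeping non-operators
def coDeleteSet : List Char := "|+*@&-:<>=/^()".toList

def coTranslateDelete (l : List Char) : List Char :=
  l.filter (fun c => !decide (c ∈ coDeleteSet))

def checkOperators_alt (exp : String) : Bool :=
  (coTranslateDelete exp.toList).length != exp.toList.length

-- ===== PRECONDITION & SPEC =====
def Spec_checkOperators (exp : String) (out : Bool) : Prop := out = checkOperators_alt exp
instance (exp : String) (out : Bool) : Decidable (Spec_checkOperators exp out) := by unfold Spec_checkOperators; infer_instance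

-- ===== CLAIM (what is proved, stated in full; the proofs are below) =====
def Claim_equal_checkOperators : Prop := ∀ (exp : String), Dom_checkOperators exp → Spec_checkOperators exp (checkOperators exp)

-- ===== LEMMAS AND PROOFS =====

-- both operator collections contain the same characters
-- the character list behind the translate table, as an explicit list
theorem delete_chars : coDeleteSet = ['|','+','*','@','&','-',':','<','>','=','/','^','(',')'] := by
  decide

theorem mem_delete_iff (c : Char) : coDeleteSet.contains c = coOperators.contains c := by
  rw [delete_chars]
  simp only [coOperators, List.contains_eq_mem, decide_eq_decide, List.mem_cons,
    List.not_mem_nil, or_false]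
  tauto

-- pointwise over the list: A's loop equals B's length comparison
theorem loop_eq_len (l : List Char) :
    coLoop l = ((coTranslateDelete l).length != l.length) := by
  induction l with
  | nil => rfl
  | cons c rest ih =>
    simp only [coLoop, coTranslateDelete, List.filter_cons, ← mem_delete_iff]
    have hle := List.length_filter_le (fun c => !decide (c ∈ coDeleteSet)) rest
    by_cases h : c ∈ coDeleteSet
    · have hne : (List.filter (fun c => !decide (c ∈ coDeleteSet)) rest).length ≠ rest.length + 1 := by
        omega
      simp [h, hne]
    · have h' : coDeleteSet.contains c = false := by
        simpa [List.contains_eq_mem] using h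
      simp only [h', Bool.false_eq_true, if_false, h, List.length_cons]
      rw [ih]
      unfold coTranslateDelete
      have key : ((List.filter (fun c => !decide (c ∈ coDeleteSet)) rest).length != rest.length)
          = ((List.filter (fun c => !decide (c ∈ coDeleteSet)) rest).length + 1 != rest.length + 1) := by
        simp
      exact key

-- ===== VERDICT (by name: the statement is the Claim_ definition above) =====
theorem checkOperators_spec : Claim_equal_checkOperators := by
  intro exp _
  unfold Spec_checkOperators checkOperators checkOperators_alt
  exact loop_eq_len exp.toList
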